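-- pv_equiv track=rewrite | github.com/DeebTibi/haar_cascades | helpers/haar_shapes.py | rectangle_sum
-- ===== SOURCE A (Python) =====
-- def rectangle_sum(int_img, img_size, x_0, y_0, size: tuple):
--     """ Efficiently compute the sum of pixels in rectangle
--         at point x_0, y_0 of a specified size using an integral image."""
--     rect_w, rect_h = size
--     w, h = img_size
--     p1 = (x_0, y_0)
--     p2 = (x_0 + rect_w - 1, y_0)
--     p3 = (x_0 + rect_w - 1, y_0 + rect_h - 1)
--     p4 = (x_0, y_0 + rect_h - 1)
--     for p in [p1, p2, p3, p4]:
--         if p[0] >= w or p[1] >= h: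
--             return -1
--     # rectangle is at the origin
--     if p1[1] == 0 and p1[0] == 0:
--         return int_img[p3[0]][p3[1]]
--
--     # rectangle is adjacent to upper border special case.
--     if p1[1] == 0:
--         return int_img[p3[0]][p3[1]] - int_img[p4[0] - 1][p4[1]]
--
--     # rectangle is adjacent to left border special case.
--     if p1[0] == 0:
--         return int_img[p3[0]][p3[1]] - int_img[p2[0]][p2[1] - 1]
--
--     return int_img[p3[0]][p3[1]] - int_img[p4[0] - 1][p4[1]] - int_img[p2[0]][p2[1] - 1] + int_img[p1[0] - 1][p1[1] - 1]
-- ===== SOURCE B (Python) =====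
-- def rectangle_sum(int_img, img_size, x_0, y_0, size: tuple):
--     """Sum of pixels in the rectangle at (x_0, y_0): recover each individual
--     pixel from the integral image by the local second difference
--     pixel(x, y) = I(x,y) - I(x-1,y) - I(x,y-1) + I(x-1,y-1)
--     (out-of-grid terms read as 0) and add the pixels up one by one."""
--     rect_w, rect_h = size
--     w, h = img_size
--     x_1 = x_0 + rect_w - 1
--     y_1 = y_0 + rect_h - 1
--     if x_0 >= w or x_1 >= w or y_0 >= h or y_1 >= h:
--         return -1
--
--     def I(x, y):
--         return int_img[x][y] if x >= 0 and y >= 0 else 0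
--
--     total = 0
--     for x in range(x_0, x_0 + rect_w):
--         for y in range(y_0, y_0 + rect_h):
--             total += I(x, y) - I(x - 1, y) - I(x, y - 1) + I(x - 1, y - 1)
--     return total
-- ===== Notes on version B (the rewrite author's own statement) =====
-- stated objective: alternative
-- what changed: Instead of A's O(1) four-corner inclusion-exclusion with origin/top/left special-case branches, B inverts the integral image: it recovers every individual pixel of the rectangle by the local second difference I(x,y)-I(x-1,y)-I(x,y-1)+I(x-1,y-1) and sums the pixels in a double loop (the sum telescopes to A's value). Pre_ restricts to the natural domain: non-negative origin, positive rectangle size, and a grid covering img_size when the bounds check passes; outside it A's values arise from Python negative-index wraparound.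
-- outside the precondition, e.g. on rectangle_sum([[1, 2], [3, 4]], (2, 2), -1, 0, (1, 1)): A returns 2, B returns 0; on rectangle_sum([[1, 2], [3, 4]], (2, 2), 0, 1, (0, 1)): A returns 1, B returns 0
import Mathlib
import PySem

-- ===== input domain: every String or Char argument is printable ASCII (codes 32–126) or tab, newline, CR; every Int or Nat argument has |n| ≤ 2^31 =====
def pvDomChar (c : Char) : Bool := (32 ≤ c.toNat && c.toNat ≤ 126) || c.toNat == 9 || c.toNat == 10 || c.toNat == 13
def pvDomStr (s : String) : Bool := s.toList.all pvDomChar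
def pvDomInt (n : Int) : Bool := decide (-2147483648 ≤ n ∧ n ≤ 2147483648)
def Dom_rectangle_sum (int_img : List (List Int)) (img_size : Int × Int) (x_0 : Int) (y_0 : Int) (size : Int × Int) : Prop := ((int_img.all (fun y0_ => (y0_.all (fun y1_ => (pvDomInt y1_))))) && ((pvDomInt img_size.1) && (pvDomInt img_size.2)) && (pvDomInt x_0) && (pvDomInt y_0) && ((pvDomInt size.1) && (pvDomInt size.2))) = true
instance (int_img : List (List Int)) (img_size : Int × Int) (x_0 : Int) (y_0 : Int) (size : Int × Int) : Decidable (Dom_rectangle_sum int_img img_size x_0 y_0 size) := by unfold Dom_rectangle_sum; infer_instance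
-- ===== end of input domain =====

-- B replaces A's O(1) four-corner inclusion-exclusion (with border special cases) by a
-- different algorithm: it recovers every pixel of the rectangle from the integral image
-- by its local second difference and sums the pixels in a double loop (objective: alternative).

-- shared indexing helper: int_img[i][j] with Python index semantics; .getD 0 is only
-- reached where Python would raise IndexError, which Pre_ excludes
def pvIdx (g : List (List Int)) (i j : Int) : Int :=
  ((PySem.List.pyGet? g i).bind (fun row => PySem.List.pyGet? row j)).getD 0

-- ===== PORT A =====
def rectangle_sum (int_img : List (List Int)) (img_size : Int × Int) (x_0 : Int) (y_0 : Int) (size : Int × Int) : Int :=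
  let rect_w := size.1
  let rect_h := size.2
  let w := img_size.1
  let h := img_size.2
  let p1 : Int × Int := (x_0, y_0)
  let p2 : Int × Int := (x_0 + rect_w - 1, y_0)
  let p3 : Int × Int := (x_0 + rect_w - 1, y_0 + rect_h - 1)
  let p4 : Int × Int := (x_0, y_0 + rect_h - 1)
  -- for p in [p1, p2, p3, p4]: if p[0] >= w or p[1] >= h: return -1
  if [p1, p2, p3, p4].any (fun p => p.1 ≥ w || p.2 ≥ h) then -1
  else if p1.2 = 0 ∧ p1.1 = 0 then
    pvIdx int_img p3.1 p3.2
  else if p1.2 = 0 then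
    pvIdx int_img p3.1 p3.2 - pvIdx int_img (p4.1 - 1) p4.2
  else if p1.1 = 0 then
    pvIdx int_img p3.1 p3.2 - pvIdx int_img p2.1 (p2.2 - 1)
  else
    pvIdx int_img p3.1 p3.2 - pvIdx int_img (p4.1 - 1) p4.2
      - pvIdx int_img p2.1 (p2.2 - 1) + pvIdx int_img (p1.1 - 1) (p1.2 - 1)

-- ===== PORT B =====
-- B's helper I(x, y): integral-image lookup, 0 outside the grid
def pvI (g : List (List Int)) (x y : Int) : Int :=
  if 0 ≤ x ∧ 0 ≤ y then pvIdx g x y else 0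

def rectangle_sum_alt (int_img : List (List Int)) (img_size : Int × Int) (x_0 : Int) (y_0 : Int) (size : Int × Int) : Int :=
  let rect_w := size.1
  let rect_h := size.2
  let w := img_size.1
  let h := img_size.2
  let x_1 := x_0 + rect_w - 1
  let y_1 := y_0 + rect_h - 1
  if x_0 ≥ w ∨ x_1 ≥ w ∨ y_0 ≥ h ∨ y_1 ≥ h then -1
  else
    (PySem.List.pyRange x_0 (x_0 + rect_w) 1).foldl (fun total x =>
      (PySem.List.pyRange y_0 (y_0 + rect_h) 1).foldl (fun t y =>
        t + (pvI int_img x y - pvI int_img (x - 1) y - pvI int_img x (y - 1)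
              + pvI int_img (x - 1) (y - 1))) total) 0

-- ===== PRECONDITION & SPEC =====
-- Pre_ admits every input on which the bounds check fires (both return -1 there); when
-- the check passes it restricts to the natural domain of the task — non-negative origin
-- and positive rectangle size (outside it A's values come from Python negative-index
-- wraparound) — and a grid large enough that A's lookups do not raise IndexError.
def Pre_rectangle_sum (int_img : List (List Int)) (img_size : Int × Int) (x_0 : Int) (y_0 : Int) (size : Int × Int) : Prop :=
  x_0 < img_size.1 ∧ x_0 + size.1 - 1 < img_size.1 ∧ y_0 < img_size.2 ∧ y_0 + size.2 - 1 < img_size.2 →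
    0 ≤ x_0 ∧ 0 ≤ y_0 ∧ 1 ≤ size.1 ∧ 1 ≤ size.2 ∧
    img_size.1 ≤ (int_img.length : Int) ∧ ∀ row ∈ int_img, img_size.2 ≤ (row.length : Int)
instance (int_img : List (List Int)) (img_size : Int × Int) (x_0 : Int) (y_0 : Int) (size : Int × Int) : Decidable (Pre_rectangle_sum int_img img_size x_0 y_0 size) := by unfold Pre_rectangle_sum; infer_instance

def pvWitness_rectangle_sum : List (List Int) × (Int × Int) × Int × Int × (Int × Int) :=
  ([[1, 2], [3, 4]], (2, 2), 0, 0, (2, 2))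

def Spec_rectangle_sum (int_img : List (List Int)) (img_size : Int × Int) (x_0 : Int) (y_0 : Int) (size : Int × Int) (out : Int) : Prop := out = rectangle_sum_alt int_img img_size x_0 y_0 size
instance (int_img : List (List Int)) (img_size : Int × Int) (x_0 : Int) (y_0 : Int) (size : Int × Int) (out : Int) : Decidable (Spec_rectangle_sum int_img img_size x_0 y_0 size out) := by unfold Spec_rectangle_sum; infer_instance

-- ===== CLAIM (what is proved, stated in full; the proofs are below) =====
def Claim_equal_rectangle_sum : Prop := ∀ (int_img : List (List Int)) (img_size : Int × Int) (x_0 : Int) (y_0 : Int) (size : Int × Int), Dom_rectangle_sum int_img img_size x_0 y_0 size → Pre_rectangle_sum int_img img_size x_0 y_0 size → Spec_rectangle_sum int_img img_size x_0 y_0 size (rectangle_sum int_img img_size x_0 y_0 size)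

-- ===== LEMMAS AND PROOFS =====

-- a fold accumulating consecutive differences telescopes
theorem pv_telescope (f : Int → Int) (a : Int) (n : Nat) (init : Int) :
    (PySem.List.pyRange a (a + (n : Int)) 1).foldl (fun t x => t + (f x - f (x - 1))) init
      = init + (f (a + (n : Int) - 1) - f (a - 1)) := by
  induction n generalizing init with
  | zero =>
    rw [show a + ((0 : Nat) : Int) = a by simp, PySem.List.pyRange_one_eq_nil le_rfl]
    simp
  | succ n ih =>
    rw [show a + ((n + 1 : Nat) : Int) = (a + (n : Int)) + 1 by push_cast; ring,
        PySem.List.pyRange_one_succ_right (by omega), List.foldl_append]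
    simp only [List.foldl_cons, List.foldl_nil]
    rw [ih]
    ring

-- the inner loop of B sums the second differences of one column strip and telescopes in y
theorem pv_inner (g : List (List Int)) (x y_0 : Int) (m : Nat) (init : Int) :
    (PySem.List.pyRange y_0 (y_0 + (m : Int)) 1).foldl (fun t y =>
        t + (pvI g x y - pvI g (x - 1) y - pvI g x (y - 1) + pvI g (x - 1) (y - 1))) init
      = init + ((pvI g x (y_0 + (m : Int) - 1) - pvI g (x - 1) (y_0 + (m : Int) - 1))
                 - (pvI g x (y_0 - 1) - pvI g (x - 1) (y_0 - 1))) := by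
  have hf : (fun (t y : Int) =>
        t + (pvI g x y - pvI g (x - 1) y - pvI g x (y - 1) + pvI g (x - 1) (y - 1)))
      = (fun (t y : Int) =>
        t + ((fun y => pvI g x y - pvI g (x - 1) y) y - (fun y => pvI g x y - pvI g (x - 1) y) (y - 1))) := by
    funext t y
    show t + (pvI g x y - pvI g (x - 1) y - pvI g x (y - 1) + pvI g (x - 1) (y - 1))
      = t + ((pvI g x y - pvI g (x - 1) y) - (pvI g x (y - 1) - pvI g (x - 1) (y - 1)))
    ring
  rw [hf, pv_telescope (fun y => pvI g x y - pvI g (x - 1) y) y_0 m init]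

-- B's double loop in closed form: the pixel sum telescopes to four corner lookups
theorem pv_alt_closed (g : List (List Int)) (x_0 y_0 : Int) (n m : Nat) :
    (PySem.List.pyRange x_0 (x_0 + (n : Int)) 1).foldl (fun total x =>
        (PySem.List.pyRange y_0 (y_0 + (m : Int)) 1).foldl (fun t y =>
          t + (pvI g x y - pvI g (x - 1) y - pvI g x (y - 1) + pvI g (x - 1) (y - 1))) total) 0
      = pvI g (x_0 + (n : Int) - 1) (y_0 + (m : Int) - 1)
          - pvI g (x_0 - 1) (y_0 + (m : Int) - 1)
          - pvI g (x_0 + (n : Int) - 1) (y_0 - 1)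
          + pvI g (x_0 - 1) (y_0 - 1) := by
  have hstep : (fun (total x : Int) =>
        (PySem.List.pyRange y_0 (y_0 + (m : Int)) 1).foldl (fun t y =>
          t + (pvI g x y - pvI g (x - 1) y - pvI g x (y - 1) + pvI g (x - 1) (y - 1))) total)
      = (fun (total x : Int) => total +
          ((fun x => pvI g x (y_0 + (m : Int) - 1) - pvI g x (y_0 - 1)) x
            - (fun x => pvI g x (y_0 + (m : Int) - 1) - pvI g x (y_0 - 1)) (x - 1))) := by
    funext total x
    rw [pv_inner]
    show total + ((pvI g x (y_0 + (m : Int) - 1) - pvI g (x - 1) (y_0 + (m : Int) - 1))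
                 - (pvI g x (y_0 - 1) - pvI g (x - 1) (y_0 - 1)))
      = total + ((pvI g x (y_0 + (m : Int) - 1) - pvI g x (y_0 - 1))
            - (pvI g (x - 1) (y_0 + (m : Int) - 1) - pvI g (x - 1) (y_0 - 1)))
    ring
  rw [hstep, pv_telescope (fun x => pvI g x (y_0 + (m : Int) - 1) - pvI g x (y_0 - 1)) x_0 n 0]
  show (0 : Int) + ((pvI g (x_0 + (n : Int) - 1) (y_0 + (m : Int) - 1) - pvI g (x_0 + (n : Int) - 1) (y_0 - 1))
        - (pvI g (x_0 - 1) (y_0 + (m : Int) - 1) - pvI g (x_0 - 1) (y_0 - 1))) = _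
  ring

-- ===== VERDICT (by name: the statement is the Claim_ definition above) =====
theorem rectangle_sum_spec : Claim_equal_rectangle_sum := by
  intro int_img img_size x_0 y_0 size _hDom hPre
  unfold Spec_rectangle_sum rectangle_sum rectangle_sum_alt
  simp only [List.any_cons, List.any_nil, Bool.or_false, Bool.or_eq_true, decide_eq_true_eq]
  split_ifs with hA hB h1 h2 h3 hB h1 h2 h3 <;>
    first
      | rfl
      | (exfalso; omega)
      | (obtain ⟨hx, hy, hw, hh, -⟩ := hPre (by omega)
         rw [show x_0 + size.1 = x_0 + ((size.1.toNat : Nat) : Int) by omega,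
             show y_0 + size.2 = y_0 + ((size.2.toNat : Nat) : Int) by omega,
             pv_alt_closed,
             show x_0 + ((size.1.toNat : Nat) : Int) - 1 = x_0 + size.1 - 1 by omega,
             show y_0 + ((size.2.toNat : Nat) : Int) - 1 = y_0 + size.2 - 1 by omega]
         simp only [pvI]
         split_ifs <;> omega)
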